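-- pv_equiv track=rewrite | github.com/daniilovchinnikov/ovchinnikovdaniil-1-md-25 | 21/Tusk3/tusk4_4.py | z4
-- ===== SOURCE A (Python) =====
-- def z4(number):
--     if len(number) % 2 != 0:
--         return False
--
--     a = len(number) // 2
--     b = number[:a]
--     c = number[a:]
--
--     sumfirst = sum(int(digit) for digit in b)
--     sumsecond = sum(int(digit) for digit in c)
--
--     return sumfirst == sumsecond
-- ===== SOURCE B (Python) =====
-- def z4(number):
--     if len(number) % 2 != 0:
--         return False
--
--     def dsum(s):
--         if len(s) == 0:
--             return 0
--         if len(s) == 1: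
--             return int(s)
--         m = len(s) // 2
--         return dsum(s[:m]) + dsum(s[m:])
--
--     h = len(number) // 2
--     return dsum(number[:h]) == dsum(number[h:])
-- ===== Notes on version B (the rewrite author's own statement) =====
-- stated objective: alternative
-- what changed: Digit sums are computed by a divide-and-conquer recursion that splits the string in half down to single characters, instead of A's two linear generator-expression passes over slices.
import Mathlib
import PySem

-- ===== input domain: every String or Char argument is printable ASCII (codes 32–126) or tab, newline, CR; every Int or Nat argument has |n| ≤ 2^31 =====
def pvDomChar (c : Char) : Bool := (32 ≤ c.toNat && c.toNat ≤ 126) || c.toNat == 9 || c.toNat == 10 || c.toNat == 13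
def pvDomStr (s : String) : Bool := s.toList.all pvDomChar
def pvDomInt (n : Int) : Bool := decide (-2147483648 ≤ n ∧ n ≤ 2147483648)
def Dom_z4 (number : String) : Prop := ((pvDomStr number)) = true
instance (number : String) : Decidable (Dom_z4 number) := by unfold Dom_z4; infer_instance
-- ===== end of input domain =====

-- B computes the two half sums by a divide-and-conquer recursion down to single characters instead of A's two linear generator passes (objective: alternative).

-- int(d) for a single-character string d (exact where int() succeeds; Pre_ excludes the raising inputs)
def pyIntChar (c : Char) : Int := (PySem.Int.ofChars? [c]).getD 0

-- ===== PORT A =====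
def z4 (number : String) : Bool :=
  let s := number.toList
  if s.length % 2 ≠ 0 then false
  else
    let a := s.length / 2
    let b := s.take a
    let c := s.drop a
    let sumfirst := (b.map pyIntChar).sum
    let sumsecond := (c.map pyIntChar).sum
    sumfirst == sumsecond

-- ===== PORT B =====
-- dsum of Source B: split in half down to single characters; int(s) on a 1-char string is pyIntChar
def pyDsum (s : List Char) : Int :=
  if s.length = 0 then 0
  else if s.length = 1 then pyIntChar (s.headD ' ')
  else
    pyDsum (s.take (s.length / 2)) + pyDsum (s.drop (s.length / 2))
termination_by s.length
decreasing_by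
  · simp [List.length_take]; omega
  · simp [List.length_drop]; omega

def z4_alt (number : String) : Bool :=
  let s := number.toList
  if s.length % 2 ≠ 0 then false
  else
    let h := s.length / 2
    pyDsum (s.take h) == pyDsum (s.drop h)

-- ===== PRECONDITION & SPEC =====
-- Pre_ excludes exactly the inputs where int(digit) raises ValueError: even-length strings containing a non-digit.
def Pre_z4 (number : String) : Prop :=
  number.toList.length % 2 = 1 ∨ number.toList.all PySem.Chars.isdigit = true
instance (number : String) : Decidable (Pre_z4 number) := by unfold Pre_z4; infer_instance
def pvWitness_z4 : String := "1230"
def Spec_z4 (number : String) (out : Bool) : Prop := out = z4_alt number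
instance (number : String) (out : Bool) : Decidable (Spec_z4 number out) := by unfold Spec_z4; infer_instance

-- ===== CLAIM (what is proved, stated in full; the proofs are below) =====
def Claim_equal_z4 : Prop := ∀ (number : String), Dom_z4 number → Pre_z4 number → Spec_z4 number (z4 number)

-- ===== LEMMAS AND PROOFS =====

theorem pyDsum_eq (s : List Char) : pyDsum s = (s.map pyIntChar).sum := by
  induction s using pyDsum.induct with
  | case1 s h0 =>
      rw [List.length_eq_zero_iff] at h0
      subst h0; simp [pyDsum]
  | case2 s h0 h1 =>
      rw [List.length_eq_one_iff] at h1
      obtain ⟨c, rfl⟩ := h1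
      simp [pyDsum]
  | case3 s h0 h1 ih1 ih2 =>
      rw [pyDsum, if_neg h0, if_neg h1, ih1, ih2]
      conv_rhs => rw [← List.take_append_drop (s.length / 2) s]
      rw [List.map_append, List.sum_append]

-- ===== VERDICT (by name: the statement is the Claim_ definition above) =====
theorem z4_spec : Claim_equal_z4 := by
  intro number _ _
  unfold Spec_z4 z4 z4_alt
  simp only [pyDsum_eq]
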